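-- pv_equiv track=rewrite | github.com/parthjpatel99/Bctci-code-solutions | sets and maps/largest_set_intersection.py | largest_set_intersection
-- ===== SOURCE A (Python) =====
-- from collections import defaultdict
--
-- def largest_set_intersection(sets):
--     k = len(sets)
--     if k == 1:
--         return 0
--
--     count = defaultdict(int)
--
--     for s in sets:
--         for n in s:
--             count[n] += 1
--
--     # Elements in elems occur k-1 times across all the sets.
--     elems = set()
--
--     for key, value in count.items():
--         if value == k - 1:
--             elems.add(key)
--
--     # For each set, we track the sum of occurence of the elements in elems
--     # We return the index of the set that has minimum such number.
--     # OR
--     # For each set, we store the number of elements in elems that have count = 0 ?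
--     # We return the index of the set where elements in elems appear 0 times ?
--
--     res = 0
--     min_count = float("inf")
--
--     for i, s in enumerate(sets):
--         count = sum(1 for num in s if num in elems)
--         if count < min_count:
--             min_count = count
--             res = i
--
--     return res
-- ===== SOURCE B (Python) =====
-- def largest_set_intersection(sets):
--     k = len(sets)
--     # group: element -> list of set indices, one entry per occurrence
--     occ = {}
--     for i, s in enumerate(sets):
--         for n in s:
--             occ.setdefault(n, []).append(i)
--     # an element occurring k-1 times is missing from exactly the sets not in its index list;
--     # credit each of its occurrences to the set holding it
--     score = [0] * k
--     for idxs in occ.values():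
--         if len(idxs) == k - 1:
--             for i in idxs:
--                 score[i] += 1
--     best = 0
--     for i in range(1, k):
--         if score[i] < score[best]:
--             best = i
--     return best
-- ===== Notes on version B (the rewrite author's own statement) =====
-- stated objective: alternative
-- what changed: A counts frequencies, builds the set of (k-1)-count elements, then re-scans every set testing each element for membership; B instead groups each element's occurrence set-indices in one dict pass and accumulates per-set scores element-major from the (k-1) groups, so the second scan over the sets disappears (the k==1 guard also becomes unnecessary).
import Mathlib
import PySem

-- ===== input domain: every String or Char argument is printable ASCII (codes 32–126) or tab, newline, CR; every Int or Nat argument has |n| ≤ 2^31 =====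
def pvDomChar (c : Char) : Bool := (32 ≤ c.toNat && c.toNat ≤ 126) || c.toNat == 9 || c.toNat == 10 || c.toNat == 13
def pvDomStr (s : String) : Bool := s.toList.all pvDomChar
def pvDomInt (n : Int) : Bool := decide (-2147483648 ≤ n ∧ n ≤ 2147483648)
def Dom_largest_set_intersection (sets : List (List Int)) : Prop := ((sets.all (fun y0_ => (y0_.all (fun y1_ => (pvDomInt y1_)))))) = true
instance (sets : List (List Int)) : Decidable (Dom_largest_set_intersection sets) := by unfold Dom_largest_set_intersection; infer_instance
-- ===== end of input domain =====

-- B replaces A's second scan over all sets (membership-testing every element against the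
-- (k-1)-count set) by one element-major pass: a dict grouping each element's occurrence
-- indices is built while counting, and each (k-1)-element credits its occurrences to a
-- per-set score array; same result, alternative decomposition (no measured speed claim).

-- ===== PORT A =====
def largest_set_intersection (sets : List (List Int)) : Int :=
  let k : Int := sets.length
  if k = 1 then 0
  else
    -- count[n] += 1 over all sets (defaultdict(int))
    let count : PySem.Dict Int Int :=
      sets.foldl (fun d s => s.foldl (fun d n => d.modify n 0 (· + 1)) d) PySem.Dict.empty
    -- elems = {key | count[key] == k - 1}
    let elems : PySem.Set Int :=
      count.items.foldl (fun e kv => if kv.2 = k - 1 then PySem.Set.add e kv.1 else e) PySem.Set.empty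
    -- res/min_count loop; min_count = float("inf") modelled as Option Int (none = inf)
    let r : Int × Option Int :=
      (PySem.List.enumerate sets).foldl
        (fun (st : Int × Option Int) p =>
          let c : Int := p.2.foldl (fun acc num => if PySem.Set.contains elems num then acc + 1 else acc) 0
          match st.2 with
          | none => (p.1, some c)
          | some m => if c < m then (p.1, some c) else st)
        (0, none)
    r.1

-- ===== PORT B =====
def largest_set_intersection_alt (sets : List (List Int)) : Int :=
  let k : Int := sets.length
  -- occ: element -> list of set indices, one per occurrence (setdefault(n, []).append(i))
  let occ : PySem.Dict Int (List Int) :=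
    (PySem.List.enumerate sets).foldl
      (fun d p => p.2.foldl (fun d n => d.modify n [] (· ++ [p.1])) d) PySem.Dict.empty
  -- score[i] += 1 for each occurrence index of each (k-1)-element
  let score : List Int :=
    occ.values.foldl
      (fun sc idxs =>
        if (idxs.length : Int) = k - 1 then
          idxs.foldl (fun sc i => PySem.List.pySetD sc i (PySem.List.pyGetD sc i 0 + 1)) sc
        else sc)
      (List.replicate k.toNat (0 : Int))
  -- first index of minimal score
  (PySem.List.pyRange 1 k 1).foldl
    (fun best i => if PySem.List.pyGetD score i 0 < PySem.List.pyGetD score best 0 then i else best)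
    0

-- ===== PRECONDITION & SPEC =====
def Spec_largest_set_intersection (sets : List (List Int)) (out : Int) : Prop := out = largest_set_intersection_alt sets
instance (sets : List (List Int)) (out : Int) : Decidable (Spec_largest_set_intersection sets out) := by unfold Spec_largest_set_intersection; infer_instance

-- ===== CLAIM (what is proved, stated in full; the proofs are below) =====
def Claim_equal_largest_set_intersection : Prop := ∀ (sets : List (List Int)), Dom_largest_set_intersection sets → Spec_largest_set_intersection sets (largest_set_intersection sets)


-- ===== LEMMAS AND PROOFS =====

-- `count[n] == k-1` test A applies to the counter of all elements (as a Bool)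
def pvGood (sets : List (List Int)) (n : Int) : Bool :=
  (sets.flatten.count n : Int) == (sets.length : Int) - 1

-- the per-set value A's final loop compares: how many (k-1)-elements set j holds
def pvG (sets : List (List Int)) (j : Int) : Int :=
  (((PySem.List.pyGetD sets j []).countP (pvGood sets) : Nat) : Int)

-- B's occurrence pairs (element, set index), flattened
def pvPairs (sets : List (List Int)) : List (Int × Int) :=
  (PySem.List.enumerate sets).flatMap (fun p => p.2.map (fun n => (n, p.1)))

def pvGrp (sets : List (List Int)) (e : Int) : List Int :=
  ((pvPairs sets).filter (fun pr => pr.1 == e)).map (fun pr => pr.2)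

-- A's min-tracking loop equals the plain first-argmin loop
theorem pv_selA (g : Int → Int) (l : List Int) : ∀ (r : Int),
    l.foldl (fun (st : Int × Option Int) j =>
      match st.2 with
      | none => (j, some (g j))
      | some m => if g j < m then (j, some (g j)) else st) (r, some (g r))
    = (l.foldl (fun best j => if g j < g best then j else best) r,
       some (g (l.foldl (fun best j => if g j < g best then j else best) r))) := by
  induction l with
  | nil => intro r; rfl
  | cons j t ih =>
      intro r
      simp only [List.foldl_cons]
      by_cases h : g j < g r
      · simp only [if_pos h]; exact ih j
      · simp only [if_neg h]; exact ih r

-- the argmin loop only looks at values of its score function on visited indices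
theorem pv_selB (g h : Int → Int) (l : List Int) : ∀ (r : Int), (∀ i ∈ l, h i = g i) → h r = g r →
    l.foldl (fun best i => if h i < h best then i else best) r
    = l.foldl (fun best i => if g i < g best then i else best) r := by
  induction l with
  | nil => intro r _ _; rfl
  | cons i t ih =>
      intro r hgh hr
      simp only [List.foldl_cons]
      rw [hgh i (by simp), hr]
      by_cases c : g i < g r
      · rw [if_pos c]
        exact ih i (fun x hx => hgh x (by simp [hx])) (hgh i (by simp))
      · rw [if_neg c]
        exact ih r (fun x hx => hgh x (by simp [hx])) hr

theorem pv_inner_len (idxs : List Int) : ∀ (sc : List Int),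
    (idxs.foldl (fun sc i => PySem.List.pySetD sc i (PySem.List.pyGetD sc i 0 + 1)) sc).length
      = sc.length := by
  induction idxs with
  | nil => intro sc; rfl
  | cons i t ih =>
      intro sc
      simp only [List.foldl_cons]
      rw [ih, PySem.List.length_pySetD]

theorem pv_inner (idxs : List Int) : ∀ (sc : List Int),
    (∀ i ∈ idxs, 0 ≤ i ∧ i < (sc.length : Int)) → ∀ (j : Int), 0 ≤ j →
    PySem.List.pyGetD (idxs.foldl (fun sc i => PySem.List.pySetD sc i (PySem.List.pyGetD sc i 0 + 1)) sc) j 0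
    = PySem.List.pyGetD sc j 0 + (idxs.count j : Int) := by
  induction idxs with
  | nil => intro sc _ j _; simp
  | cons i t ih =>
      intro sc hall j hj
      obtain ⟨hi0, hilt⟩ := hall i (by simp)
      have hi' : ((i.toNat : Nat) : Int) = i := Int.toNat_of_nonneg hi0
      have hiN : i.toNat < sc.length := by omega
      simp only [List.foldl_cons]
      rw [ih _ (fun x hx => by
            rw [PySem.List.length_pySetD]; exact hall x (by simp [hx])) j hj]
      have hj' : ((j.toNat : Nat) : Int) = j := Int.toNat_of_nonneg hj
      rw [← hi', ← hj', PySem.List.pyGetD_pySetD_natCast sc i.toNat j.toNat _ 0 hiN]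
      by_cases hji : j.toNat = i.toNat
      · rw [if_pos hji, hji, List.count_cons]
        simp only [BEq.rfl, if_pos]
        push_cast
        omega
      · rw [if_neg hji, List.count_cons]
        have h2 : ((↑i.toNat : Int) == (↑j.toNat : Int)) = false := by
          simp only [beq_eq_false_iff_ne, ne_eq, Int.natCast_inj]
          omega
        simp only [h2, Bool.false_eq_true, if_false]
        push_cast
        omega

theorem pv_scorefold (c : Int) (ds : List (List Int)) : ∀ (sc : List Int),
    (∀ gI ∈ ds, ∀ i ∈ gI, 0 ≤ i ∧ i < (sc.length : Int)) → ∀ (j : Int), 0 ≤ j →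
    PySem.List.pyGetD
      (ds.foldl (fun sc idxs =>
        if (idxs.length : Int) = c then
          idxs.foldl (fun sc i => PySem.List.pySetD sc i (PySem.List.pyGetD sc i 0 + 1)) sc
        else sc) sc) j 0
    = PySem.List.pyGetD sc j 0
      + ((ds.filter (fun gI => (gI.length : Int) == c)).map (fun gI => (gI.count j : Int))).sum := by
  induction ds with
  | nil => intro sc _ j _; simp
  | cons d t ih =>
      intro sc hall j hj
      simp only [List.foldl_cons, List.filter_cons]
      by_cases hc : (d.length : Int) = c
      · have hb : ((d.length : Int) == c) = true := by simp [hc]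
        rw [if_pos hc]
        rw [ih _ (fun gI hg x hx => by
              rw [pv_inner_len]; exact hall gI (by simp [hg]) x hx) j hj]
        rw [pv_inner d sc (fun x hx => hall d (by simp) x hx) j hj]
        simp only [hb, if_true, List.map_cons, List.sum_cons]
        ring
      · have hb : ((d.length : Int) == c) = false := by simp [hc]
        rw [if_neg hc]
        rw [ih _ (fun gI hg x hx => hall gI (by simp [hg]) x hx) j hj]
        simp only [hb, Bool.false_eq_true, if_false]

-- indicator sum over a list = count (Nat)
theorem pv_sum_ind (a : Int) (M : List Int) :
    (M.map (fun e => if a == e then 1 else 0)).sum = M.count a := by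
  induction M with
  | nil => rfl
  | cons b t ih =>
      simp only [List.map_cons, List.sum_cons, List.count_cons, ih]
      by_cases h : a = b
      · subst h; simp; omega
      · have h1 : (a == b) = false := by simp [h]
        have h2 : (b == a) = false := by simp [Ne.symm h]
        simp [h1, h2]

-- summing per-element counts over the distinct good elements counts the good occurrences
theorem pv_dsum (L : List Int) (P : Int → Bool) (hnd : L.Nodup) : ∀ (t : List Int),
    (∀ x ∈ t, x ∈ L) →
    ((L.filter P).map (fun e => t.count e)).sum = t.countP P := by
  intro t
  induction t with
  | nil => intro _; simp
  | cons a t ih =>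
      intro hsub
      have hat : a ∈ L := hsub a (by simp)
      simp only [List.count_cons, List.countP_cons]
      have hsplit : ((L.filter P).map (fun e => t.count e + if a == e then 1 else 0)).sum
          = ((L.filter P).map (fun e => t.count e)).sum
            + ((L.filter P).map (fun e => if a == e then 1 else 0)).sum := by
        rw [← List.sum_map_add]
      rw [hsplit, ih (fun x hx => hsub x (by simp [hx])), pv_sum_ind]
      by_cases hP : P a = true
      · have : (L.filter P).count a = 1 :=
          List.count_eq_one_of_mem (hnd.filter P) (List.mem_filter.mpr ⟨hat, hP⟩)
        simp [this, hP]
      · have : (L.filter P).count a = 0 :=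
          List.count_eq_zero.mpr (fun hmem => hP (List.mem_filter.mp hmem).2)
        simp [this, hP]

-- picking a single index out of a range-indexed sum
theorem pv_single_sum (sets : List (List Int)) (f : List Int → Nat) (j : Int)
    (h0 : 0 ≤ j) (hlt : j < (sets.length : Int)) :
    ((PySem.List.pyRange 0 (PySem.List.len sets) 1).map
      (fun i => if i = j then f (PySem.List.pyGetD sets i []) else 0)).sum
    = f (PySem.List.pyGetD sets j []) := by
  have hlen : PySem.List.len sets = (sets.length : Int) := PySem.List.len_eq sets
  rw [hlen]
  rw [PySem.List.pyRange_one_append 0 j (sets.length : Int) h0 (le_of_lt hlt)]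
  rw [PySem.List.pyRange_one_cons hlt]
  simp only [List.map_append, List.sum_append, List.map_cons, List.sum_cons]
  have hz1 : ((PySem.List.pyRange 0 j 1).map
      (fun i => if i = j then f (PySem.List.pyGetD sets i []) else 0)).sum = 0 := by
    apply List.sum_eq_zero
    intro x hx
    simp only [List.mem_map] at hx
    obtain ⟨i, hi, hx⟩ := hx
    rw [PySem.List.mem_pyRange_one] at hi
    rw [← hx, if_neg (by omega)]
  have hz2 : ((PySem.List.pyRange (j + 1) (sets.length : Int) 1).map
      (fun i => if i = j then f (PySem.List.pyGetD sets i []) else 0)).sum = 0 := by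
    apply List.sum_eq_zero
    intro x hx
    simp only [List.mem_map] at hx
    obtain ⟨i, hi, hx⟩ := hx
    rw [PySem.List.mem_pyRange_one] at hi
    rw [← hx, if_neg (by omega)]
  rw [hz1, hz2]
  simp

theorem pv_pairs_fst (sets : List (List Int)) :
    (pvPairs sets).map (fun pr => pr.1) = sets.flatten := by
  unfold pvPairs
  simp [List.map_map, Function.comp_def, List.flatMap_def, PySem.List.map_snd_enumerate]

theorem pv_grp_len (sets : List (List Int)) (e : Int) :
    (pvGrp sets e).length = sets.flatten.count e := by
  unfold pvGrp
  rw [List.length_map, ← List.countP_eq_length_filter,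
      ← pv_pairs_fst sets, List.count_eq_countP, List.countP_map]
  rfl

theorem pv_grp_count (sets : List (List Int)) (e : Int) (j : Int)
    (h0 : 0 ≤ j) (hlt : j < (sets.length : Int)) :
    (pvGrp sets e).count j = (PySem.List.pyGetD sets j []).count e := by
  unfold pvGrp pvPairs
  rw [List.count_eq_countP, List.countP_map, List.countP_filter, List.flatMap_def,
      List.countP_flatten, List.map_map]
  rw [List.map_congr_left (g := fun p : Int × List Int => if p.1 = j then List.count e p.2 else 0)
      (by
        intro p _
        simp only [Function.comp_def, List.countP_map]
        by_cases hp : p.1 = j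
        · rw [if_pos hp, List.count_eq_countP]
          apply List.countP_congr
          intro n _
          simp [hp]
        · rw [if_neg hp]
          apply List.countP_eq_zero.mpr
          intro n _
          simp [hp])]
  rw [PySem.List.enumerate_eq_map_pyRange sets [], List.map_map]
  exact pv_single_sum sets (fun s => List.count e s) j h0 hlt

theorem pv_contains_elems (sets : List (List Int)) (h2 : 2 ≤ sets.length) (n : Int) :
    PySem.Set.contains
      ((PySem.Dict.counter sets.flatten).items.foldl
        (fun e kv => if kv.2 = (sets.length : Int) - 1 then PySem.Set.add e kv.1 else e)
        PySem.Set.empty) n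
    = pvGood sets n := by
  rw [PySem.List.foldl_ite_eq_foldl_filter
        (p := fun kv : Int × Int => kv.2 = (sets.length : Int) - 1)
        (f := fun e kv => PySem.Set.add e kv.1)]
  rw [show ∀ (M : List (Int × Int)),
        M.foldl (fun e kv => PySem.Set.add e kv.1) PySem.Set.empty
          = PySem.Set.ofList (M.map (fun kv => kv.1)) from
      fun M => by rw [PySem.Set.ofList_eq_foldl, List.foldl_map]; rfl]
  have hiff : n ∈ PySem.Set.ofList
        (((PySem.Dict.counter sets.flatten).items.filter
          (fun kv => decide (kv.2 = (sets.length : Int) - 1))).map (fun kv => kv.1))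
      ↔ ((sets.flatten.count n : Int) = (sets.length : Int) - 1) := by
    rw [PySem.Set.mem_ofList]
    simp only [List.mem_map, List.mem_filter, PySem.Dict.items_counter, decide_eq_true_eq]
    constructor
    · rintro ⟨kv, ⟨⟨e, he, rfl⟩, hv⟩, rfl⟩
      exact hv
    · intro h
      refine ⟨(n, (sets.flatten.count n : Int)), ⟨⟨n, ?_, rfl⟩, h⟩, rfl⟩
      rw [PySem.Set.mem_ofList]
      have : 0 < sets.flatten.count n := by omega
      exact List.count_pos_iff.mp this
  by_cases hg : (sets.flatten.count n : Int) = (sets.length : Int) - 1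
  · rw [(PySem.Set.contains_iff _ n).mpr (hiff.mpr hg)]
    simp [pvGood, hg]
  · have h1 : PySem.Set.contains _ n = false :=
      Bool.eq_false_iff.mpr (fun hm => hg (hiff.mp ((PySem.Set.contains_iff _ n).mp hm)))
    rw [h1]
    simp [pvGood, hg]

theorem pv_grp_bounds (sets : List (List Int)) (e i : Int) (h : i ∈ pvGrp sets e) :
    0 ≤ i ∧ i < (sets.length : Int) := by
  unfold pvGrp pvPairs at h
  simp only [List.mem_map, List.mem_filter, List.mem_flatMap] at h
  obtain ⟨pr, ⟨⟨p, hp, ⟨n, _, hn⟩⟩, _⟩, hi⟩ := h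
  rw [PySem.List.mem_enumerate_iff] at hp
  obtain ⟨kk, hkk, hpk⟩ := hp
  subst hpk
  rw [← hn] at hi
  omega

theorem pv_occ_getD (sets : List (List Int)) (e : Int) :
    ((pvPairs sets).foldl (fun d pr => d.modify pr.1 [] (· ++ [pr.2]))
      (PySem.Dict.empty : PySem.Dict Int (List Int))).getD e []
    = pvGrp sets e := by
  rw [PySem.Dict.getD_foldl_modify_append]
  rw [PySem.Dict.getD_empty]
  rfl

theorem pv_occ_keys (sets : List (List Int)) :
    ((pvPairs sets).foldl (fun d pr => d.modify pr.1 [] (· ++ [pr.2]))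
      (PySem.Dict.empty : PySem.Dict Int (List Int))).keys
    = PySem.Set.ofList sets.flatten := by
  rw [PySem.Dict.keys_foldl_modify_key (pvPairs sets) (fun pr => pr.1) []
        (fun _ pr => (· ++ [pr.2]))]
  rw [pv_pairs_fst sets]
  rw [PySem.Set.ofList_eq_foldl]
  rfl

theorem pv_occ_nodup (sets : List (List Int)) :
    ((pvPairs sets).foldl (fun d pr => d.modify pr.1 [] (· ++ [pr.2]))
      (PySem.Dict.empty : PySem.Dict Int (List Int))).keys.Nodup := by
  rw [pv_occ_keys]
  exact PySem.Set.nodup_ofList _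

theorem pv_occ_values (sets : List (List Int)) :
    ((pvPairs sets).foldl (fun d pr => d.modify pr.1 [] (· ++ [pr.2]))
      (PySem.Dict.empty : PySem.Dict Int (List Int))).values
    = (PySem.Set.ofList sets.flatten).map (pvGrp sets) := by
  rw [PySem.Dict.values_eq_map_keys _ (pv_occ_nodup sets) []]
  rw [pv_occ_keys]
  apply List.map_congr_left
  intro e _
  exact pv_occ_getD sets e

theorem pv_getD_replicate (m : Nat) (j : Int) (hj : 0 ≤ j) :
    PySem.List.pyGetD (List.replicate m (0 : Int)) j 0 = 0 := by
  have hj' : ((j.toNat : Nat) : Int) = j := Int.toNat_of_nonneg hj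
  rw [← hj', PySem.List.pyGetD_natCast]
  rcases Nat.lt_or_ge j.toNat m with h | h
  · rw [List.getD_eq_getElem _ _ (by simpa using h)]
    simp
  · rw [List.getD_eq_default _ _ (by simpa using h)]

theorem pv_score (sets : List (List Int)) (j : Int) (h0 : 0 ≤ j)
    (hlt : j < (sets.length : Int)) :
    PySem.List.pyGetD
      (((PySem.Set.ofList sets.flatten).map (pvGrp sets)).foldl
        (fun sc idxs =>
          if (idxs.length : Int) = (sets.length : Int) - 1 then
            idxs.foldl (fun sc i => PySem.List.pySetD sc i (PySem.List.pyGetD sc i 0 + 1)) sc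
          else sc)
        (List.replicate (sets.length : Int).toNat (0 : Int))) j 0
    = pvG sets j := by
  rw [pv_scorefold ((sets.length : Int) - 1) _ _
        (fun gI hg i hi => by
          simp only [List.mem_map] at hg
          obtain ⟨e, _, he⟩ := hg
          rw [← he] at hi
          have := pv_grp_bounds sets e i hi
          simp only [List.length_replicate]
          omega)
        j h0]
  rw [pv_getD_replicate _ j h0]
  rw [List.filter_map, List.map_map]
  have hfc : (PySem.Set.ofList sets.flatten).filter
        ((fun gI : List Int => (gI.length : Int) == (sets.length : Int) - 1) ∘ pvGrp sets)
      = (PySem.Set.ofList sets.flatten).filter (pvGood sets) := by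
    apply List.filter_congr
    intro e _
    simp only [Function.comp_apply, pv_grp_len, pvGood]
  rw [hfc]
  have hmc : ((PySem.Set.ofList sets.flatten).filter (pvGood sets)).map
        ((fun gI : List Int => (gI.count j : Int)) ∘ pvGrp sets)
      = ((PySem.Set.ofList sets.flatten).filter (pvGood sets)).map
        (fun e => ((PySem.List.pyGetD sets j []).count e : Int)) := by
    apply List.map_congr_left
    intro e _
    simp only [Function.comp_apply, pv_grp_count sets e j h0 hlt]
  rw [hmc]
  have hcast : (((PySem.Set.ofList sets.flatten).filter (pvGood sets)).map
        (fun e => ((PySem.List.pyGetD sets j []).count e : Int))).sum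
      = ((((PySem.Set.ofList sets.flatten).filter (pvGood sets)).map
        (fun e => (PySem.List.pyGetD sets j []).count e)).sum : Nat) := by
    rw [Nat.cast_list_sum, List.map_map]
    rfl
  rw [hcast]
  rw [pv_dsum (PySem.Set.ofList sets.flatten) (pvGood sets) (PySem.Set.nodup_ofList _)
        (PySem.List.pyGetD sets j [])
        (fun x hx => by
          rw [PySem.Set.mem_ofList]
          rw [List.mem_flatten]
          refine ⟨PySem.List.pyGetD sets j [], ?_, hx⟩
          exact PySem.List.pyGetD_mem sets [] (by constructor <;> omega))]
  unfold pvG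
  simp

theorem pv_main : ∀ (sets : List (List Int)),
    largest_set_intersection sets = largest_set_intersection_alt sets := by
  intro sets
  by_cases h1 : sets.length = 1
  · have hA : largest_set_intersection sets = 0 := by
      dsimp only [largest_set_intersection]
      rw [if_pos (by rw [h1]; rfl)]
    have hB : largest_set_intersection_alt sets = 0 := by
      dsimp only [largest_set_intersection_alt]
      rw [h1]
      rw [PySem.List.pyRange_one_eq_nil (by norm_num)]
      rfl
    rw [hA, hB]
  by_cases h0 : sets.length = 0
  · rw [List.length_eq_zero_iff.mp h0]
    rfl
  have hk2 : 2 ≤ sets.length := by omega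
  have hk1 : ¬ ((sets.length : Int) = 1) := by omega
  have hkpos : (0 : Int) < (sets.length : Int) := by
    have : 0 < sets.length := by omega
    exact_mod_cast this
  -- A side
  have hAside : largest_set_intersection sets
      = ((PySem.List.pyRange 1 (sets.length : Int) 1).foldl
          (fun best j => if pvG sets j < pvG sets best then j else best) 0) := by
    dsimp only [largest_set_intersection]
    rw [if_neg hk1]
    rw [← List.foldl_flatten, ← PySem.Dict.counter_eq_foldl]
    simp only [PySem.List.foldl_if_add_one, pv_contains_elems sets hk2, zero_add]
    rw [PySem.List.enumerate_eq_map_pyRange sets [], List.foldl_map]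
    rw [PySem.List.len_eq, PySem.List.pyRange_one_cons hkpos]
    simp only [List.foldl_cons]
    exact congrArg Prod.fst (pv_selA (pvG sets) (PySem.List.pyRange 1 (sets.length : Int) 1) 0)
  -- B side
  have hBside : largest_set_intersection_alt sets
      = ((PySem.List.pyRange 1 (sets.length : Int) 1).foldl
          (fun best j => if pvG sets j < pvG sets best then j else best) 0) := by
    dsimp only [largest_set_intersection_alt]
    have hocc : (PySem.List.enumerate sets).foldl
          (fun d p => p.2.foldl (fun d n => d.modify n [] (· ++ [p.1])) d)
          (PySem.Dict.empty : PySem.Dict Int (List Int))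
        = (pvPairs sets).foldl (fun d pr => d.modify pr.1 [] (· ++ [pr.2]))
          (PySem.Dict.empty : PySem.Dict Int (List Int)) := by
      unfold pvPairs
      rw [List.flatMap_def, List.foldl_flatten, List.foldl_map]
      apply PySem.List.foldl_congr_mem
      intro acc p _
      rw [List.foldl_map]
    rw [hocc, pv_occ_values sets]
    apply pv_selB (pvG sets) _ _ 0
    · intro i hi
      rw [PySem.List.mem_pyRange_one] at hi
      exact pv_score sets i (by omega) (by omega)
    · exact pv_score sets 0 le_rfl hkpos
  rw [hAside, hBside]

-- ===== VERDICT (by name: the statement is the Claim_ definition above) =====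
theorem largest_set_intersection_spec : Claim_equal_largest_set_intersection := by
  intro sets _
  unfold Spec_largest_set_intersection
  exact pv_main sets
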